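-- pv_equiv track=rewrite | github.com/murkins/Homework | KateHaravaya/Task.4.9.py | get_characters_3
-- ===== SOURCE A (Python) =====
-- import string
--
-- def get_characters_3(number_of_strings):
--     string_sets = [set(x.lower()) for x in number_of_strings]
--
--     characters = []
--     for c in string.ascii_lowercase:
--         counter = 0
--         for cur_set in string_sets:
--             if c in cur_set:
--                 counter += 1
--
--         if counter >= 2:
--             characters.append(c)
--
--     return characters
-- ===== SOURCE B (Python) =====
-- import string
--
-- def get_characters_3(number_of_strings):
--     cnt = {}
--     for x in number_of_strings:
--         for ch in set(x.lower()):
--             cnt[ch] = cnt.get(ch, 0) + 1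
--     return [c for c in string.ascii_lowercase if cnt.get(c, 0) >= 2]
-- ===== Notes on version B (the rewrite author's own statement) =====
-- stated objective: faster
-- what changed: Replaces the 26-letter outer loop that rescans every string's set with a single tallying pass building a per-letter count dict, then one filtered collection over the alphabet.
import Mathlib
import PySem

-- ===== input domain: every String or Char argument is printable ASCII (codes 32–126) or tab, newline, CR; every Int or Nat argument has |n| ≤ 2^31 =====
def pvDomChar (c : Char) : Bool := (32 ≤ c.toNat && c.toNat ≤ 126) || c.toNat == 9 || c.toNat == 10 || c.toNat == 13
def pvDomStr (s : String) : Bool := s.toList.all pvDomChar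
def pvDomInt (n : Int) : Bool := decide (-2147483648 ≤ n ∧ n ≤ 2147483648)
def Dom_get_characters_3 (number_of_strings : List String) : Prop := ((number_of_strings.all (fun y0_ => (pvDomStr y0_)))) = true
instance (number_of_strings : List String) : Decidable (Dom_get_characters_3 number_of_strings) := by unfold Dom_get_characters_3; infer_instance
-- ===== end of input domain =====

-- B replaces A's 26-letter outer loop (each rescanning every string's character set)
-- with one tallying pass building a per-letter count dict, then a single filtered
-- collection over the alphabet (objective: faster, constant-factor).

-- ===== PORT A =====
def get_characters_3 (number_of_strings : List String) : List String :=
  let string_sets := number_of_strings.map (fun x => PySem.Set.ofList (PySem.Str.lower x).toList)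
  ("abcdefghijklmnopqrstuvwxyz".toList).foldl (fun characters c =>
    let counter : Int := string_sets.foldl (fun counter cur_set =>
      if PySem.Set.contains cur_set c then counter + 1 else counter) 0
    if counter ≥ 2 then characters ++ [String.singleton c] else characters) []

-- ===== PORT B =====
def get_characters_3_alt (number_of_strings : List String) : List String :=
  let cnt : PySem.Dict Char Int := number_of_strings.foldl (fun d x =>
    (PySem.Set.ofList (PySem.Str.lower x).toList).foldl
      (fun d ch => d.insert ch (d.getD ch 0 + 1)) d) PySem.Dict.empty
  (("abcdefghijklmnopqrstuvwxyz".toList).filter (fun c => cnt.getD c 0 ≥ 2)).map String.singleton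

-- ===== PRECONDITION & SPEC =====
def Spec_get_characters_3 (number_of_strings : List String) (out : List String) : Prop := out = get_characters_3_alt number_of_strings
instance (number_of_strings : List String) (out : List String) : Decidable (Spec_get_characters_3 number_of_strings out) := by unfold Spec_get_characters_3; infer_instance

-- ===== CLAIM (what is proved, stated in full; the proofs are below) =====
def Claim_equal_get_characters_3 : Prop := ∀ (number_of_strings : List String), Dom_get_characters_3 number_of_strings → Spec_get_characters_3 number_of_strings (get_characters_3 number_of_strings)

-- ===== LEMMAS AND PROOFS =====

-- the tally dict counts, for each char, the number of strings whose lowered char-set contains it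
lemma cnt_getD (ns : List String) (d : PySem.Dict Char Int) (c : Char) :
    (ns.foldl (fun d x =>
      (PySem.Set.ofList (PySem.Str.lower x).toList).foldl
        (fun d ch => d.insert ch (d.getD ch 0 + 1)) d) d).getD c 0
    = d.getD c 0 +
      (ns.countP (fun x => decide (c ∈ PySem.Chars.lower x.toList)) : Int) := by
  induction ns generalizing d with
  | nil => simp
  | cons x t ih =>
    simp only [List.foldl_cons, List.countP_cons, ih,
      PySem.Dict.getD_foldl_insert_add_one]
    have hnd := PySem.Set.nodup_ofList ((PySem.Str.lower x).toList)
    by_cases hm : c ∈ PySem.Chars.lower x.toList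
    · have hm' : c ∈ (PySem.Set.ofList (PySem.Str.lower x).toList : List Char) := by
        simp [PySem.Set.mem_ofList, hm]
      rw [List.count_eq_one_of_mem hnd hm']
      simp [hm]; ring
    · have hm' : c ∉ (PySem.Set.ofList (PySem.Str.lower x).toList : List Char) := by
        simp [PySem.Set.mem_ofList, hm]
      rw [List.count_eq_zero_of_not_mem hm']
      simp [hm]

theorem get_characters_3_spec : Claim_equal_get_characters_3 := by
  intro ns _
  unfold Spec_get_characters_3 get_characters_3 get_characters_3_alt
  simp only []
  rw [PySem.List.foldl_congr_mem (g := fun characters c =>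
    if (decide ((2 : Int) ≤
        ((ns.countP (fun x => decide (c ∈ PySem.Chars.lower x.toList))) : Int))) = true
      then characters ++ [String.singleton c] else characters)]
  · rw [PySem.List.foldl_append_if]
    simp only [List.nil_append]
    congr 1
    apply List.filter_congr
    intro c _
    rw [cnt_getD]
    simp [ge_iff_le]
  · intro acc c _
    rw [PySem.List.foldl_if_add_one, List.countP_map]
    simp [Function.comp_def, PySem.Set.mem_ofList, ge_iff_le]
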